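-- pv_equiv track=rewrite | github.com/christophertbrown/bioscripts | ctbBio/fastq_merge.py | fq_merge
-- ===== SOURCE A (Python) =====
-- import itertools
--
-- def fq_merge(R1, R2):
--     """
--     merge separate fastq files
--     """
--     c = itertools.cycle([1, 2, 3, 4])
--     for r1, r2 in zip(R1, R2):
--         n = next(c)
--         if n == 1:
--             pair = [[], []]
--         pair[0].append(r1.strip())
--         pair[1].append(r2.strip())
--         if n == 4:
--             yield pair
-- ===== SOURCE B (Python) =====
-- def fq_merge(R1, R2):
--     """
--     merge separate fastq files
--     """
--     for g1, g2 in zip(zip(*[iter(R1)] * 4), zip(*[iter(R2)] * 4)):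
--         yield [[x.strip() for x in g1], [x.strip() for x in g2]]
-- ===== Notes on version B (the rewrite author's own statement) =====
-- stated objective: idiomatic
-- what changed: Replaces the cycle-counter state machine with mutable pair accumulator by the standard grouper idiom: each stream is chunked into fixed groups of 4 and the groups are zipped and stripped, with no per-line state.
import Mathlib
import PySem

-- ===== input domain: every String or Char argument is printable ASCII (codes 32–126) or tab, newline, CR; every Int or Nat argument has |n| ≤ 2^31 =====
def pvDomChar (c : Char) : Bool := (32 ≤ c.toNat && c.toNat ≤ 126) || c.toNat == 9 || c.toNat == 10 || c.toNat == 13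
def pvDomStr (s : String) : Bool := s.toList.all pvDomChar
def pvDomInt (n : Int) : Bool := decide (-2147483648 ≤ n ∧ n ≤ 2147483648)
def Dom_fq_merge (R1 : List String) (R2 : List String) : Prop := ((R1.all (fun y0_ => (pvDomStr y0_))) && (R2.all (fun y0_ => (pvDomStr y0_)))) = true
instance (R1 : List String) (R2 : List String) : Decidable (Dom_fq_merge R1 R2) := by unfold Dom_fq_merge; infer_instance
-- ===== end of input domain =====

-- B replaces A's cycle-counter state machine (mutable pair, reset on n==1, emit on n==4)
-- by the grouper idiom: chunk each stream into groups of 4, zip the groups, strip each line.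

-- ===== PORT A =====
-- the for-loop over zip(R1, R2): state = (counter value n cycling 1..4, current pair accumulator)
def fqMergeLoop : List (String × String) → Nat → (List String × List String) → List (List (List String))
  | [], _, _ => []
  | (r1, r2) :: rest, n, pair =>
    let pair := if n = 1 then (([] : List String), ([] : List String)) else pair
    let pair := (pair.1 ++ [PySem.Str.strip r1], pair.2 ++ [PySem.Str.strip r2])
    if n = 4 then [pair.1, pair.2] :: fqMergeLoop rest 1 pair
    else fqMergeLoop rest (n + 1) pair

def fq_merge (R1 : List String) (R2 : List String) : List (List (List String)) :=
  fqMergeLoop (R1.zip R2) 1 ([], [])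

-- ===== PORT B =====
-- zip(*[iter(L)]*4): chunk into groups of exactly 4, dropping the remainder
def chunks4 : List String → List (List String)
  | a :: b :: c :: d :: rest => [a, b, c, d] :: chunks4 rest
  | _ => []

def fq_merge_alt (R1 : List String) (R2 : List String) : List (List (List String)) :=
  ((chunks4 R1).zip (chunks4 R2)).map
    (fun g => [g.1.map PySem.Str.strip, g.2.map PySem.Str.strip])

-- ===== PRECONDITION & SPEC =====
def Spec_fq_merge (R1 : List String) (R2 : List String) (out : List (List (List String))) : Prop := out = fq_merge_alt R1 R2
instance (R1 : List String) (R2 : List String) (out : List (List (List String))) : Decidable (Spec_fq_merge R1 R2 out) := by unfold Spec_fq_merge; infer_instance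

-- ===== CLAIM (what is proved, stated in full; the proofs are below) =====
def Claim_equal_fq_merge : Prop := ∀ (R1 : List String) (R2 : List String), Dom_fq_merge R1 R2 → Spec_fq_merge R1 R2 (fq_merge R1 R2)

-- ===== LEMMAS AND PROOFS =====

-- fewer than 4 zipped lines starting at counter 1: no group is ever emitted
theorem fqMergeLoop_short (l : List (String × String)) (p : List String × List String)
    (h : l.length < 4) : fqMergeLoop l 1 p = [] := by
  match l with
  | [] => rfl
  | [x] => simp [fqMergeLoop]
  | [x, y] => simp [fqMergeLoop]
  | [x, y, z] => simp [fqMergeLoop]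
  | _ :: _ :: _ :: _ :: _ => simp only [List.length_cons] at h; omega

theorem fq_merge_eq_alt (R1 R2 : List String) (p : List String × List String) :
    fqMergeLoop (R1.zip R2) 1 p = fq_merge_alt R1 R2 := by
  match R1, R2 with
  | a1 :: a2 :: a3 :: a4 :: r1, b1 :: b2 :: b3 :: b4 :: r2 =>
    have ih := fq_merge_eq_alt r1 r2
      ([PySem.Str.strip a1, PySem.Str.strip a2, PySem.Str.strip a3, PySem.Str.strip a4],
       [PySem.Str.strip b1, PySem.Str.strip b2, PySem.Str.strip b3, PySem.Str.strip b4])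
    simp [fqMergeLoop, fq_merge_alt, chunks4] at ih ⊢
    exact ih
  | [], R2 => simp [fqMergeLoop, fq_merge_alt, chunks4]
  | [a], R2 =>
    refine (fqMergeLoop_short _ _ (by simp only [List.length_zip, List.length_cons, List.length_nil]; omega)).trans ?_
    simp [fq_merge_alt, chunks4]
  | [a, b], R2 =>
    refine (fqMergeLoop_short _ _ (by simp only [List.length_zip, List.length_cons, List.length_nil]; omega)).trans ?_
    simp [fq_merge_alt, chunks4]
  | [a, b, c], R2 =>
    refine (fqMergeLoop_short _ _ (by simp only [List.length_zip, List.length_cons, List.length_nil]; omega)).trans ?_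
    simp [fq_merge_alt, chunks4]
  | a1 :: a2 :: a3 :: a4 :: r1, [] =>
    simp [fqMergeLoop, fq_merge_alt, chunks4]
  | a1 :: a2 :: a3 :: a4 :: r1, [b] =>
    refine (fqMergeLoop_short _ _ (by simp only [List.length_zip, List.length_cons, List.length_nil]; omega)).trans ?_
    simp [fq_merge_alt, chunks4]
  | a1 :: a2 :: a3 :: a4 :: r1, [b, c] =>
    refine (fqMergeLoop_short _ _ (by simp only [List.length_zip, List.length_cons, List.length_nil]; omega)).trans ?_
    simp [fq_merge_alt, chunks4]
  | a1 :: a2 :: a3 :: a4 :: r1, [b, c, d] =>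
    refine (fqMergeLoop_short _ _ (by simp only [List.length_zip, List.length_cons, List.length_nil]; omega)).trans ?_
    simp [fq_merge_alt, chunks4]
termination_by R1.length

-- ===== VERDICT (by name: the statement is the Claim_ definition above) =====
theorem fq_merge_spec : Claim_equal_fq_merge := by
  intro R1 R2 _
  unfold Spec_fq_merge fq_merge
  exact fq_merge_eq_alt R1 R2 ([], [])
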